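-- pv_equiv track=rewrite | github.com/eddmpython/dartlab | src/dartlab/providers/edinet/finance/pivot.py | detectAccountingStandard
-- ===== SOURCE A (Python) =====
-- def detectAccountingStandard(elementIds: list[str]) -> str:
--     """element_id prefix로 회계표준 감지.
--
--     Returns: 'J-GAAP', 'IFRS', 'US-GAAP', 'unknown'
--     """
--     counts = {"jppfs": 0, "jpcrp": 0, "ifrs": 0, "usgaap": 0}
--     for eid in elementIds:
--         lower = eid.lower()
--         if lower.startswith("jppfs_") or lower.startswith("jpcrp_"):
--             counts["jppfs"] += 1
--         elif lower.startswith("ifrs") or lower.startswith("ifrs-full_"):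
--             counts["ifrs"] += 1
--         elif lower.startswith("us-gaap_") or lower.startswith("usgaap_"):
--             counts["usgaap"] += 1
--
--     total_jp = counts["jppfs"] + counts["jpcrp"]
--     if counts["ifrs"] > total_jp and counts["ifrs"] > counts["usgaap"]:
--         return "IFRS"
--     if counts["usgaap"] > total_jp and counts["usgaap"] > counts["ifrs"]:
--         return "US-GAAP"
--     return "J-GAAP"
-- ===== SOURCE B (Python) =====
-- def detectAccountingStandard(elementIds: list[str]) -> str:
--     """element_id prefix로 회계표준 감지 — one independent tally per standard."""
--     jp = sum(1 for eid in elementIds if eid.lower().startswith(("jppfs_", "jpcrp_")))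
--     ifrs = sum(1 for eid in elementIds if eid.lower().startswith("ifrs"))
--     usgaap = sum(1 for eid in elementIds if eid.lower().startswith(("us-gaap_", "usgaap_")))
--     if ifrs > jp and ifrs > usgaap:
--         return "IFRS"
--     if usgaap > jp and usgaap > ifrs:
--         return "US-GAAP"
--     return "J-GAAP"
-- ===== Notes on version B (the rewrite author's own statement) =====
-- stated objective: simpler
-- what changed: Replaced the single loop that updates a four-key counts dict through an if/elif chain with three independent prefix-count passes (sum of a generator per standard), dropping the dict and the redundant 'ifrs-full_' test; correct because the prefix families are mutually disjoint.
import Mathlib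
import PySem

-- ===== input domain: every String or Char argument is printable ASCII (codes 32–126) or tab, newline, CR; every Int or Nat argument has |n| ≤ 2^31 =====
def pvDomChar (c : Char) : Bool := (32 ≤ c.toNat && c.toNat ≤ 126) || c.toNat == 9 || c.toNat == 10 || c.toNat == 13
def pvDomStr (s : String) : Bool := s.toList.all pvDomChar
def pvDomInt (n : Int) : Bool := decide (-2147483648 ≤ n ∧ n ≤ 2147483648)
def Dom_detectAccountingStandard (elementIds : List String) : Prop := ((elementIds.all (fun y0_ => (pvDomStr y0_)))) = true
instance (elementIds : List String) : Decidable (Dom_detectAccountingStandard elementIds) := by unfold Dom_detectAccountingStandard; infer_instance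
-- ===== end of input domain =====

-- B tallies each standard with an independent prefix-count pass instead of A's single
-- loop over a four-key counts dict with an if/elif chain (objective: simpler).

-- ===== PORT A =====
def detectAccountingStandard (elementIds : List String) : String :=
  let counts : PySem.Dict String Int :=
    ((((PySem.Dict.empty).insert "jppfs" 0).insert "jpcrp" 0).insert "ifrs" 0).insert "usgaap" 0
  let counts := elementIds.foldl (fun d eid =>
    let lower := PySem.Str.lower eid
    if PySem.Str.startswith lower "jppfs_" || PySem.Str.startswith lower "jpcrp_" then
      d.insert "jppfs" (d.getD "jppfs" 0 + 1)
    else if PySem.Str.startswith lower "ifrs" || PySem.Str.startswith lower "ifrs-full_" then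
      d.insert "ifrs" (d.getD "ifrs" 0 + 1)
    else if PySem.Str.startswith lower "us-gaap_" || PySem.Str.startswith lower "usgaap_" then
      d.insert "usgaap" (d.getD "usgaap" 0 + 1)
    else d) counts
  let total_jp := counts.getD "jppfs" 0 + counts.getD "jpcrp" 0
  if counts.getD "ifrs" 0 > total_jp ∧ counts.getD "ifrs" 0 > counts.getD "usgaap" 0 then
    "IFRS"
  else if counts.getD "usgaap" 0 > total_jp ∧ counts.getD "usgaap" 0 > counts.getD "ifrs" 0 then
    "US-GAAP"
  else
    "J-GAAP"

-- ===== PORT B =====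
def detectAccountingStandard_alt (elementIds : List String) : String :=
  let jp : Int := elementIds.countP (fun eid =>
    PySem.Str.startswith (PySem.Str.lower eid) "jppfs_" || PySem.Str.startswith (PySem.Str.lower eid) "jpcrp_")
  let ifrs : Int := elementIds.countP (fun eid =>
    PySem.Str.startswith (PySem.Str.lower eid) "ifrs")
  let usgaap : Int := elementIds.countP (fun eid =>
    PySem.Str.startswith (PySem.Str.lower eid) "us-gaap_" || PySem.Str.startswith (PySem.Str.lower eid) "usgaap_")
  if ifrs > jp ∧ ifrs > usgaap then "IFRS"
  else if usgaap > jp ∧ usgaap > ifrs then "US-GAAP"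
  else "J-GAAP"

-- ===== PRECONDITION & SPEC =====
def Spec_detectAccountingStandard (elementIds : List String) (out : String) : Prop := out = detectAccountingStandard_alt elementIds
instance (elementIds : List String) (out : String) : Decidable (Spec_detectAccountingStandard elementIds out) := by unfold Spec_detectAccountingStandard; infer_instance

-- ===== CLAIM (what is proved, stated in full; the proofs are below) =====
def Claim_equal_detectAccountingStandard : Prop := ∀ (elementIds : List String), Dom_detectAccountingStandard elementIds → Spec_detectAccountingStandard elementIds (detectAccountingStandard elementIds)

-- ===== LEMMAS AND PROOFS =====

-- a true startswith pins down the head of the string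
theorem pv_sw_head (L p : List Char) (c : Char) (hc : p.head? = some c)
    (h : PySem.Chars.startswith L p = true) : L.head? = some c := by
  rw [PySem.Chars.startswith_iff] at h
  cases p with
  | nil => simp at hc
  | cons a t =>
    obtain ⟨u, hu⟩ := h
    simp only [List.head?_cons] at hc
    rw [← hu, List.cons_append, List.head?_cons, hc]

-- a prefix whose first character differs from the string's head cannot match
theorem pv_sw_false_of_head (L p : List Char) (c d : Char) (hL : L.head? = some d)
    (hc : p.head? = some c) (hne : c ≠ d) : PySem.Chars.startswith L p = false := by
  cases hx : PySem.Chars.startswith L p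
  · rfl
  · have h := pv_sw_head L p c hc hx
    rw [hL] at h
    injection h with h'
    exact absurd h'.symm hne

-- category predicates (the lowered string's standard family)
def pvJ (eid : String) : Bool :=
  PySem.Str.startswith (PySem.Str.lower eid) "jppfs_" || PySem.Str.startswith (PySem.Str.lower eid) "jpcrp_"
def pvI (eid : String) : Bool :=
  PySem.Str.startswith (PySem.Str.lower eid) "ifrs"
def pvIfull (eid : String) : Bool :=
  PySem.Str.startswith (PySem.Str.lower eid) "ifrs-full_"
def pvU (eid : String) : Bool :=
  PySem.Str.startswith (PySem.Str.lower eid) "us-gaap_" || PySem.Str.startswith (PySem.Str.lower eid) "usgaap_"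

theorem pvI_not_pvJ (eid : String) (h : pvI eid = true) : pvJ eid = false := by
  simp only [pvI, pvJ, PySem.Str.startswith_eq] at h ⊢
  have hL := pv_sw_head _ _ 'i' (by decide) h
  rw [pv_sw_false_of_head _ _ 'j' 'i' hL (by decide) (by decide),
      pv_sw_false_of_head _ _ 'j' 'i' hL (by decide) (by decide)]
  rfl

theorem pvU_not_pvJ (eid : String) (h : pvU eid = true) : pvJ eid = false := by
  simp only [pvU, pvJ, PySem.Str.startswith_eq, Bool.or_eq_true] at h ⊢
  have hL : (PySem.Str.lower eid).toList.head? = some 'u' := by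
    rcases h with h | h
    · exact pv_sw_head _ _ 'u' (by decide) h
    · exact pv_sw_head _ _ 'u' (by decide) h
  rw [pv_sw_false_of_head _ _ 'j' 'u' hL (by decide) (by decide),
      pv_sw_false_of_head _ _ 'j' 'u' hL (by decide) (by decide)]
  rfl

theorem pvU_not_pvI (eid : String) (h : pvU eid = true) : pvI eid = false := by
  simp only [pvU, pvI, PySem.Str.startswith_eq, Bool.or_eq_true] at h ⊢
  have hL : (PySem.Str.lower eid).toList.head? = some 'u' := by
    rcases h with h | h
    · exact pv_sw_head _ _ 'u' (by decide) h
    · exact pv_sw_head _ _ 'u' (by decide) h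
  exact pv_sw_false_of_head _ _ 'i' 'u' hL (by decide) (by decide)

theorem pvIfull_pvI (eid : String) (h : pvIfull eid = true) : pvI eid = true := by
  simp only [pvIfull, pvI, PySem.Str.startswith_eq, PySem.Chars.startswith_iff] at h ⊢
  exact List.IsPrefix.trans (by decide) h

-- the fold body of A's loop, named for the proofs (definitionally the lambda in the port)
def pvStep (d : PySem.Dict String Int) (eid : String) : PySem.Dict String Int :=
  let lower := PySem.Str.lower eid
  if PySem.Str.startswith lower "jppfs_" || PySem.Str.startswith lower "jpcrp_" then
    d.insert "jppfs" (d.getD "jppfs" 0 + 1)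
  else if PySem.Str.startswith lower "ifrs" || PySem.Str.startswith lower "ifrs-full_" then
    d.insert "ifrs" (d.getD "ifrs" 0 + 1)
  else if PySem.Str.startswith lower "us-gaap_" || PySem.Str.startswith lower "usgaap_" then
    d.insert "usgaap" (d.getD "usgaap" 0 + 1)
  else d

theorem pvStep_branch (d : PySem.Dict String Int) (eid : String) :
    pvStep d eid =
      if pvJ eid then d.insert "jppfs" (d.getD "jppfs" 0 + 1)
      else if pvI eid then d.insert "ifrs" (d.getD "ifrs" 0 + 1)
      else if pvU eid then d.insert "usgaap" (d.getD "usgaap" 0 + 1)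
      else d := by
  have hfull : (pvI eid || pvIfull eid) = pvI eid := by
    cases hI : pvI eid
    · cases hF : pvIfull eid
      · rfl
      · rw [pvIfull_pvI eid hF] at hI; simp at hI
    · rfl
  simp only [pvStep, pvJ, pvI, pvIfull, pvU] at hfull ⊢
  rw [hfull]
  rfl

-- characterization of A's counts dict after the fold
theorem pv_fold_counts (l : List String) (d : PySem.Dict String Int) :
    (l.foldl pvStep d).getD "jppfs" 0 = d.getD "jppfs" 0 + (l.countP pvJ : Int) ∧
    (l.foldl pvStep d).getD "jpcrp" 0 = d.getD "jpcrp" 0 ∧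
    (l.foldl pvStep d).getD "ifrs" 0 = d.getD "ifrs" 0 + (l.countP pvI : Int) ∧
    (l.foldl pvStep d).getD "usgaap" 0 = d.getD "usgaap" 0 + (l.countP pvU : Int) := by
  induction l generalizing d with
  | nil => simp
  | cons eid t ih =>
    obtain ⟨h1, h2, h3, h4⟩ := ih (pvStep d eid)
    simp only [List.foldl_cons, List.countP_cons]
    rw [h1, h2, h3, h4, pvStep_branch]
    by_cases hJ : pvJ eid = true
    · have hI : pvI eid = false := by
        cases hI : pvI eid
        · rfl
        · rw [pvI_not_pvJ eid hI] at hJ; exact absurd hJ (by simp)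
      have hU : pvU eid = false := by
        cases hU : pvU eid
        · rfl
        · rw [pvU_not_pvJ eid hU] at hJ; exact absurd hJ (by simp)
      refine ⟨?_, ?_, ?_, ?_⟩ <;> (simp [hJ, hI, hU, PySem.Dict.getD_insert]; try omega)
    · by_cases hI : pvI eid = true
      · have hU : pvU eid = false := by
          cases hU : pvU eid
          · rfl
          · rw [pvU_not_pvI eid hU] at hI; exact absurd hI (by simp)
        refine ⟨?_, ?_, ?_, ?_⟩ <;> (simp [hJ, hI, hU, PySem.Dict.getD_insert]; try omega)
      · by_cases hU : pvU eid = true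
        · refine ⟨?_, ?_, ?_, ?_⟩ <;> (simp [hJ, hI, hU, PySem.Dict.getD_insert]; try omega)
        · refine ⟨?_, ?_, ?_, ?_⟩ <;> (simp [hJ, hI, hU]; try omega)

-- ===== VERDICT (by name: the statement is the Claim_ definition above) =====
theorem detectAccountingStandard_spec : Claim_equal_detectAccountingStandard := by
  intro elementIds _
  show detectAccountingStandard elementIds = detectAccountingStandard_alt elementIds
  unfold detectAccountingStandard detectAccountingStandard_alt
  obtain ⟨h1, h2, h3, h4⟩ := pv_fold_counts elementIds
    (((((PySem.Dict.empty).insert "jppfs" 0).insert "jpcrp" 0).insert "ifrs" 0).insert "usgaap" 0)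
  simp only [show (fun (d : PySem.Dict String Int) (eid : String) =>
      let lower := PySem.Str.lower eid
      if PySem.Str.startswith lower "jppfs_" || PySem.Str.startswith lower "jpcrp_" then
        d.insert "jppfs" (d.getD "jppfs" 0 + 1)
      else if PySem.Str.startswith lower "ifrs" || PySem.Str.startswith lower "ifrs-full_" then
        d.insert "ifrs" (d.getD "ifrs" 0 + 1)
      else if PySem.Str.startswith lower "us-gaap_" || PySem.Str.startswith lower "usgaap_" then
        d.insert "usgaap" (d.getD "usgaap" 0 + 1)
      else d) = pvStep from rfl]
  rw [h1, h2, h3, h4,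
    show (fun eid => PySem.Str.startswith (PySem.Str.lower eid) "jppfs_" ||
      PySem.Str.startswith (PySem.Str.lower eid) "jpcrp_") = pvJ from rfl,
    show (fun eid => PySem.Str.startswith (PySem.Str.lower eid) "ifrs") = pvI from rfl,
    show (fun eid => PySem.Str.startswith (PySem.Str.lower eid) "us-gaap_" ||
      PySem.Str.startswith (PySem.Str.lower eid) "usgaap_") = pvU from rfl]
  norm_num [PySem.Dict.getD_insert]
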